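-- pv_equiv track=rewrite | github.com/joshanashakya/dissertation | workspace/dataset/java-python/GeeksForGeeks/1382/A/2.py | digitNumber
-- ===== SOURCE A (Python) =====
-- mod=1000000007
--
-- def digitNumber(n):
--
--     # Checking if number
--     # of digits is zero
--     if (n == 0):
--         return 1
--
--     # Checking if number
--     # of digits is one
--     if (n == 1):
--         return 9
--
--     # Checking if number
--     # of digits is odd
--     if (n % 2!=0):
--
--         # Calling digitNumber function
--         # with (digit-1)/2 digits
--         temp = digitNumber((n - 1) // 2) % mod
--         return (9 * (temp * temp) % mod) % mod
--     else:
--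
--         # Calling digitNumber function
--         # with n/2 digits
--         temp = digitNumber(n // 2) % mod
--         return (temp * temp) % mod
-- ===== SOURCE B (Python) =====
-- mod = 1000000007
--
-- def digitNumber(n):
--     # powers of 9 for single decimal digits: table[d] = 9**d % mod
--     table = []
--     t = 1
--     for _ in range(10):
--         table.append(t)
--         t = t * 9 % mod
--     # decimal digits of n, least significant first
--     digits = []
--     m = n
--     while True:
--         digits.append(m % 10)
--         m //= 10
--         if m == 0:
--             break
--     # left-to-right base-10 exponentiation over the digits of n
--     result = 1
--     for d in reversed(digits):
--         r2 = result * result % mod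
--         r4 = r2 * r2 % mod
--         r8 = r4 * r4 % mod
--         result = r8 * r2 % mod * table[d] % mod
--     return result
-- ===== Notes on version B (the rewrite author's own statement) =====
-- stated objective: alternative
-- what changed: Replaces the binary halving recursion with an iterative left-to-right base-10 exponentiation: a 10-entry table of 9^d mod p is precomputed, the decimal digits of n are extracted, and a single fold raises the accumulator to the 10th power and multiplies in the digit's table entry.
import Mathlib
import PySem

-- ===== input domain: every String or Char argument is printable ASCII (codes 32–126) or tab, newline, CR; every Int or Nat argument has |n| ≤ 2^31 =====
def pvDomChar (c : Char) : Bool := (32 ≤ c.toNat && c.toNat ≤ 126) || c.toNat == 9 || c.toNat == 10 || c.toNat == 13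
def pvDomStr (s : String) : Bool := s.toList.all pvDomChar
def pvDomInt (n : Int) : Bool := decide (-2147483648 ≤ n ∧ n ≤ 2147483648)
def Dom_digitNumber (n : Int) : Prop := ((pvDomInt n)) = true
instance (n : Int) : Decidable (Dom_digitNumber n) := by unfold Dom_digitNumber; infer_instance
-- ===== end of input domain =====

-- B replaces A's binary halving recursion by an iterative left-to-right base-10 digit exponentiation with a precomputed table of 9^d (alternative algorithm, same value for every nonnegative n).
set_option maxRecDepth 4000


-- ===== PORT A =====
-- A's recursion, step for step, on the nonnegative magnitude (on negative n the
-- Python recursion never terminates; that case is excluded by Pre_ below).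
def digitNumberGo (n : Nat) : Int :=
  if n = 0 then 1
  else if n = 1 then 9
  else if n % 2 ≠ 0 then
    let temp := digitNumberGo ((n - 1) / 2) % 1000000007
    (9 * (temp * temp) % 1000000007) % 1000000007
  else
    let temp := digitNumberGo (n / 2) % 1000000007
    (temp * temp) % 1000000007
decreasing_by all_goals omega

def digitNumber (n : Int) : Int :=
  if n < 0 then 0 else digitNumberGo n.toNat

-- ===== PORT B =====
-- table[d] = 9^d % mod, built by Source B's loop over range(10) carrying (table, t).
def pvTable : List Int :=
  ((List.range 10).foldl (fun (st : List Int × Int) _ =>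
     (st.1 ++ [st.2], st.2 * 9 % 1000000007)) ([], 1)).1

-- Source B's do-while: decimal digits of m, least significant first (on negative n the
-- Python loop never terminates; that case is excluded by Pre_ below).
def pvDigits (m : Nat) : List Nat :=
  m % 10 :: (if m / 10 = 0 then [] else pvDigits (m / 10))
decreasing_by
  exact Nat.div_lt_self (by omega) (by omega)

-- the body of Source B's for-loop over the reversed digit list
def pvStep (result : Int) (d : Nat) : Int :=
  let r2 := result * result % 1000000007
  let r4 := r2 * r2 % 1000000007
  let r8 := r4 * r4 % 1000000007
  r8 * r2 % 1000000007 * (pvTable.getD d 0) % 1000000007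

def digitNumber_alt (n : Int) : Int :=
  if n < 0 then 0
  else (pvDigits n.toNat).reverse.foldl pvStep 1

-- ===== PRECONDITION & SPEC =====
-- Pre_ excludes exactly the negative n, on which the Python A recurses forever (RecursionError).
def Pre_digitNumber (n : Int) : Prop := 0 ≤ n
instance (n : Int) : Decidable (Pre_digitNumber n) := by unfold Pre_digitNumber; infer_instance
def pvWitness_digitNumber : Int := (5)

def Spec_digitNumber (n : Int) (out : Int) : Prop := out = digitNumber_alt n
instance (n : Int) (out : Int) : Decidable (Spec_digitNumber n out) := by unfold Spec_digitNumber; infer_instance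

-- ===== CLAIM (what is proved, stated in full; the proofs are below) =====
def Claim_equal_digitNumber : Prop := ∀ (n : Int), Dom_digitNumber n → Pre_digitNumber n → Spec_digitNumber n (digitNumber n)

-- ===== LEMMAS AND PROOFS =====

-- a % p % p = a % p for the fixed modulus.
theorem hmm (a : Int) : a % 1000000007 % 1000000007 = a % 1000000007 :=
  Int.emod_emod_of_dvd a dvd_rfl

-- A's recursion computes the modular power of the base.
theorem digitNumberGo_eq (n : Nat) : digitNumberGo n = (9 : Int) ^ n % 1000000007 := by
  induction n using Nat.strong_induction_on with
  | _ n ih =>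
    unfold digitNumberGo
    split
    · simp_all
    · split
      · simp_all
      · split
        · next h0 h1 hodd =>
          have hk : (n - 1) / 2 < n := by omega
          rw [ih _ hk]
          have hn : n = (n - 1) / 2 + (n - 1) / 2 + 1 := by omega
          conv_rhs => rw [hn]
          simp only [pow_succ, pow_add, hmm, Int.mul_emod]
          ring_nf
        · next h0 h1 heven =>
          have hk : n / 2 < n := by omega
          rw [ih _ hk]
          have hn : n = n / 2 + n / 2 := by omega
          conv_rhs => rw [hn]
          simp only [pow_add, hmm, Int.mul_emod]

-- (a % p) * (b % p) % p = a * b % p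
theorem mulmod (a b : Int) : (a % 1000000007) * (b % 1000000007) % 1000000007 = a * b % 1000000007 :=
  (Int.mul_emod a b 1000000007).symm

-- one step of B's loop turns 9^q % p into 9^(10*q+d) % p (d a decimal digit)
theorem pvStep_pow (q d : Nat) (hd : d < 10) :
    pvStep ((9 : Int) ^ q % 1000000007) d = (9 : Int) ^ (10 * q + d) % 1000000007 := by
  have htab : pvTable.getD d 0 = (9 : Int) ^ d % 1000000007 := by
    interval_cases d <;> decide
  unfold pvStep
  simp only [htab, mulmod, ← pow_add]
  congr 2
  omega

-- B's fold over the reversed decimal digits computes the modular power of the base.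
theorem pvDigits_fold (m : Nat) :
    (pvDigits m).reverse.foldl pvStep 1 = (9 : Int) ^ m % 1000000007 := by
  induction m using Nat.strong_induction_on with
  | _ m ih =>
    unfold pvDigits
    by_cases h : m / 10 = 0
    · rw [if_pos h]
      have hm : m < 10 := by omega
      have hmod : m % 10 = m := by omega
      have h1 : (1 : Int) = (9 : Int) ^ (0 : Nat) % 1000000007 := by decide
      simp only [List.reverse_cons, List.reverse_nil, List.nil_append, List.foldl_cons,
        List.foldl_nil, hmod, h1]
      rw [pvStep_pow 0 m hm]
      norm_num
    · rw [if_neg h]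
      have hlt : m / 10 < m := Nat.div_lt_self (by omega) (by omega)
      simp only [List.reverse_cons, List.foldl_append, List.foldl_cons, List.foldl_nil]
      rw [ih _ hlt, pvStep_pow (m / 10) (m % 10) (by omega)]
      congr 2
      omega

-- ===== VERDICT (by name: the statement is the Claim_ definition above) =====
theorem digitNumber_spec : Claim_equal_digitNumber := by
  intro n _hd hpre
  unfold Pre_digitNumber at hpre
  unfold Spec_digitNumber digitNumber digitNumber_alt
  rw [if_neg (by omega), if_neg (by omega), digitNumberGo_eq, pvDigits_fold]
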